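-- pv_equiv track=rewrite | github.com/fkguo/autoresearch-lab | skills/research-team/scripts/gates/check_notebook_integrity.py | _has_non_placeholder_audit_content
-- ===== SOURCE A (Python) =====
-- _AUDIT_PLACEHOLDER_LINES = {
--     "- key algorithm steps to cross-check:",
--     "- proxy headline numbers (audit quantities; fast to verify by hand/estimate):",
--     "- boundary or consistency checks (limits/symmetry/conservation):",
--     "- trivial operations not rechecked (standard library, io, plotting):",
--     "- audit slice artifacts (logs/tables):",
-- }
--
-- def _has_non_placeholder_audit_content(audit: str) -> bool:
--     # Consider the block "filled" if it contains any non-empty line that is not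
--     # one of the template placeholder bullets.
--     for ln in audit.splitlines():
--         s = ln.strip()
--         if not s:
--             continue
--         if s.lower() in _AUDIT_PLACEHOLDER_LINES:
--             continue
--         return True
--     return False
-- ===== SOURCE B (Python) =====
-- _AUDIT_PLACEHOLDER_LINES = {
--     "- key algorithm steps to cross-check:",
--     "- proxy headline numbers (audit quantities; fast to verify by hand/estimate):",
--     "- boundary or consistency checks (limits/symmetry/conservation):",
--     "- trivial operations not rechecked (standard library, io, plotting):",
--     "- audit slice artifacts (logs/tables):",
-- }
--
-- def _has_non_placeholder_audit_content(audit: str) -> bool: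
--     # Counting formulation: normalize every line, count the non-empty lines and,
--     # placeholder by placeholder, how many lines each placeholder accounts for;
--     # the block is "filled" exactly when the non-empty lines outnumber the
--     # placeholder occurrences (placeholders are distinct and non-empty, so the
--     # counts coincide iff every non-empty line is a placeholder).
--     lines = [ln.strip().lower() for ln in audit.splitlines()]
--     nonempty = len(lines) - lines.count("")
--     placeholder_hits = sum(lines.count(p) for p in _AUDIT_PLACEHOLDER_LINES)
--     return nonempty > placeholder_hits
-- ===== Notes on version B (the rewrite author's own statement) =====
-- stated objective: alternative
-- what changed: Replaces A's short-circuiting per-line existence scan with a counting formulation: one pass normalizes the lines, then the number of non-empty lines is compared with the summed per-placeholder occurrence counts (correct because placeholders are distinct and non-empty).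
import Mathlib
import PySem

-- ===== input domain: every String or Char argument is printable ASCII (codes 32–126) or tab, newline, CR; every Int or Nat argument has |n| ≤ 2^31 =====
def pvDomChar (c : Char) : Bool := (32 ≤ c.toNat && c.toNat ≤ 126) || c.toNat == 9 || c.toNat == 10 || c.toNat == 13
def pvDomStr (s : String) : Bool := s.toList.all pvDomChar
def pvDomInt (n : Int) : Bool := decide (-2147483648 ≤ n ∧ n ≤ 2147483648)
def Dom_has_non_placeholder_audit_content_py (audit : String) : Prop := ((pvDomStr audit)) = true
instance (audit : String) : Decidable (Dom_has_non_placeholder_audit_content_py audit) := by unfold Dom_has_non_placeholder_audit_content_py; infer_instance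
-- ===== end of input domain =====

-- B replaces A's short-circuiting existence scan by a counting formulation: it counts the
-- non-empty normalized lines and, placeholder by placeholder, the lines each placeholder
-- accounts for, and compares the two totals (alternative; same cost).

-- the module constant _AUDIT_PLACEHOLDER_LINES (a Python set of strings)
def pvPlaceholders : PySem.Set String := PySem.Set.ofList
  [ "- key algorithm steps to cross-check:"
  , "- proxy headline numbers (audit quantities; fast to verify by hand/estimate):"
  , "- boundary or consistency checks (limits/symmetry/conservation):"
  , "- trivial operations not rechecked (standard library, io, plotting):"
  , "- audit slice artifacts (logs/tables):" ]

-- ===== PORT A =====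
-- A's for-loop with continue/return, as structural recursion over the lines
def pvAuditLoop : List String → Bool
  | [] => false
  | ln :: rest =>
    let s := PySem.Str.strip ln
    if s = "" then pvAuditLoop rest
    else if PySem.Set.contains pvPlaceholders (PySem.Str.lower s) then pvAuditLoop rest
    else true

def has_non_placeholder_audit_content_py (audit : String) : Bool :=
  pvAuditLoop (PySem.Str.splitlines audit)

-- ===== PORT B =====
def has_non_placeholder_audit_content_py_alt (audit : String) : Bool :=
  let lines := (PySem.Str.splitlines audit).map
      (fun ln => PySem.Str.lower (PySem.Str.strip ln))
  let nonempty := lines.length - PySem.List.count lines ""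
  let placeholderHits :=
    (pvPlaceholders.map (fun p => PySem.List.count lines p)).sum
  nonempty > placeholderHits

-- ===== PRECONDITION & SPEC =====
def Spec_has_non_placeholder_audit_content_py (audit : String) (out : Bool) : Prop := out = has_non_placeholder_audit_content_py_alt audit
instance (audit : String) (out : Bool) : Decidable (Spec_has_non_placeholder_audit_content_py audit out) := by unfold Spec_has_non_placeholder_audit_content_py; infer_instance

-- ===== CLAIM (what is proved, stated in full; the proofs are below) =====
def Claim_equal_has_non_placeholder_audit_content_py : Prop := ∀ (audit : String), Dom_has_non_placeholder_audit_content_py audit → Spec_has_non_placeholder_audit_content_py audit (has_non_placeholder_audit_content_py audit)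

-- ===== LEMMAS AND PROOFS =====

-- A's loop returns true iff some line is non-empty after stripping and not a placeholder
theorem pvAuditLoop_iff (L : List String) :
    pvAuditLoop L = true ↔
      ∃ ln ∈ L, PySem.Str.strip ln ≠ "" ∧
        PySem.Str.lower (PySem.Str.strip ln) ∉ pvPlaceholders := by
  induction L with
  | nil => simp [pvAuditLoop]
  | cons ln rest ih =>
    simp only [pvAuditLoop]
    by_cases h1 : PySem.Str.strip ln = ""
    · simp [h1, ih]
    · by_cases h2 : PySem.Str.lower (PySem.Str.strip ln) ∈ pvPlaceholders
      · have h2' : PySem.Set.contains pvPlaceholders (PySem.Str.lower (PySem.Str.strip ln)) = true :=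
          (PySem.Set.contains_iff _ _).2 h2
        simp [h1, h2, ih]
      · have h2' : PySem.Set.contains pvPlaceholders (PySem.Str.lower (PySem.Str.strip ln)) = false := by
          rw [← Bool.not_eq_true, PySem.Set.contains_iff]; exact h2
        simp only [if_neg h1, h2', Bool.false_eq_true, if_false, true_iff]
        exact ⟨ln, List.mem_cons_self .., h1, h2⟩

-- lower maps a string to an equal-length string, so it sends "" to "" only
theorem lower_eq_empty_iff (s : String) : PySem.Str.lower s = "" ↔ s = "" := by
  constructor
  · intro h
    have hl : (PySem.Str.lower s).toList = ([] : List Char) := by rw [h]; rfl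
    rw [PySem.Str.toList_lower] at hl
    unfold PySem.Chars.lower at hl
    exact String.toList_eq_nil_iff.mp (List.map_eq_nil_iff.1 hl)
  · intro h; rw [h]; rfl

-- counting membership in q :: qs splits into counting q and counting qs when q is not in qs
theorem countP_mem_cons (q : String) (qs : List String) (hq : q ∉ qs) (L : List String) :
    L.countP (fun s => decide (s ∈ q :: qs)) =
      L.count q + L.countP (fun s => decide (s ∈ qs)) := by
  induction L with
  | nil => simp
  | cons x L ih =>
    rw [List.countP_cons, List.count_cons, List.countP_cons, ih]
    by_cases hxq : x = q
    · simp [hxq, hq]; omega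
    · have : (x == q) = false := by simpa using hxq
      by_cases hxqs : x ∈ qs <;> simp [hxq, hxqs, this]
      omega

-- summing per-placeholder counts over a duplicate-free key list is counting membership
theorem sum_counts_eq_countP (ps : List String) (hnd : ps.Nodup) (L : List String) :
    (ps.map (fun p => PySem.List.count L p)).sum =
      L.countP (fun s => decide (s ∈ ps)) := by
  induction ps with
  | nil => simp
  | cons q qs ih =>
    have hnq : q ∉ qs := (List.nodup_cons.1 hnd).1
    rw [List.map_cons, List.sum_cons, ih hnd.of_cons, countP_mem_cons q qs hnq L,
      PySem.List.count_eq]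

-- strict count comparison under a pointwise implication is existence of a separating element
theorem countP_lt_countP_iff {α : Type} (p q : α → Bool) (L : List α)
    (h : ∀ x ∈ L, q x = true → p x = true) :
    L.countP q < L.countP p ↔ ∃ x ∈ L, p x = true ∧ q x = false := by
  induction L with
  | nil => simp
  | cons x L ih =>
    have hL : ∀ y ∈ L, q y = true → p y = true := fun y hy => h y (List.mem_cons_of_mem _ hy)
    have hmono : L.countP q ≤ L.countP p := List.countP_mono_left hL
    rw [List.countP_cons, List.countP_cons]
    cases hq : q x <;> cases hp : p x
    · simp only [Bool.false_eq_true, if_false, Nat.add_zero, ih hL]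
      constructor
      · rintro ⟨y, hy, h1, h2⟩; exact ⟨y, List.mem_cons_of_mem _ hy, h1, h2⟩
      · rintro ⟨y, hy, h1, h2⟩
        rcases List.mem_cons.1 hy with rfl | hy
        · rw [hp] at h1; cases h1
        · exact ⟨y, hy, h1, h2⟩
    · simp only [Bool.false_eq_true, if_false, Nat.add_zero]
      constructor
      · intro _; exact ⟨x, List.mem_cons_self .., hp, hq⟩
      · intro _; exact Nat.lt_succ_of_le hmono
    · rw [h x (List.mem_cons_self ..) hq] at hp; cases hp
    · simp only [Nat.add_lt_add_iff_right, ih hL]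
      constructor
      · rintro ⟨y, hy, h1, h2⟩; exact ⟨y, List.mem_cons_of_mem _ hy, h1, h2⟩
      · rintro ⟨y, hy, h1, h2⟩
        rcases List.mem_cons.1 hy with rfl | hy
        · rw [hq] at h2; cases h2
        · exact ⟨y, hy, h1, h2⟩

-- B's comparison of the two counts is the same existence statement over the raw lines
theorem alt_iff (audit : String) :
    has_non_placeholder_audit_content_py_alt audit = true ↔
      ∃ ln ∈ PySem.Str.splitlines audit, PySem.Str.strip ln ≠ "" ∧
        PySem.Str.lower (PySem.Str.strip ln) ∉ pvPlaceholders := by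
  unfold has_non_placeholder_audit_content_py_alt
  set f : String → String := fun ln => PySem.Str.lower (PySem.Str.strip ln) with hf
  set raw := PySem.Str.splitlines audit with hraw
  set L := raw.map f with hL
  have hnd : pvPlaceholders.Nodup := PySem.Set.nodup_ofList _
  have h1 : L.length - PySem.List.count L "" = L.countP (fun s => decide (¬ s = "")) := by
    rw [PySem.List.count_eq]
    have hsplit : L.length = L.countP (fun s => s == "") + L.countP (fun s => !(s == "")) := by
      have := List.length_eq_countP_add_countP (l := L) (p := fun s : String => s == "")
      simpa using this
    have hcnt : List.count "" L = L.countP (fun s => s == "") := by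
      simp [List.count]
    have heq : L.countP (fun s => decide (¬ s = "")) = L.countP (fun s => !(s == "")) := by
      apply List.countP_congr; intro s _; simp
    rw [heq, hcnt]; omega
  have h2 := sum_counts_eq_countP pvPlaceholders hnd L
  rw [decide_eq_true_iff, h1, h2, gt_iff_lt]
  have hsub : ∀ s ∈ L, decide (s ∈ pvPlaceholders) = true →
      decide (¬ s = "") = true := by
    intro s _ hs
    rw [decide_eq_true_iff] at hs ⊢
    intro hempty; subst hempty; revert hs; decide
  rw [countP_lt_countP_iff _ _ L hsub]
  constructor
  · rintro ⟨t, htL, hpt, hqt⟩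
    rw [hL] at htL
    obtain ⟨ln, hln, rfl⟩ := List.mem_map.1 htL
    refine ⟨ln, hln, ?_, ?_⟩
    · intro hstrip
      rw [decide_eq_true_iff, hf] at hpt
      exact hpt (by simp only []; rw [hstrip]; rfl)
    · intro hmem
      rw [decide_eq_false_iff_not] at hqt
      exact hqt hmem
  · rintro ⟨ln, hln, hne, hnotin⟩
    refine ⟨f ln, List.mem_map_of_mem hln, ?_, ?_⟩
    · rw [decide_eq_true_iff, hf]
      intro h
      exact hne ((lower_eq_empty_iff _).1 h)
    · rw [decide_eq_false_iff_not]
      exact hnotin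

-- ===== VERDICT (by name: the statement is the Claim_ definition above) =====
theorem has_non_placeholder_audit_content_py_spec : Claim_equal_has_non_placeholder_audit_content_py := by
  intro audit _
  unfold Spec_has_non_placeholder_audit_content_py has_non_placeholder_audit_content_py
  rw [Bool.eq_iff_iff, pvAuditLoop_iff, alt_iff]
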